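-- pv_equiv track=rewrite | github.com/vkadel1111/practices | practices_one/inter_ppoligon.py | solution
-- ===== SOURCE A (Python) =====
-- def solution(n):
--     solution = 0
--
--     for i in range(1,n+1):
--         if i == 1:
--             solution=1
--         else:
--             solution += (i * 4) - 4
--     return solution
-- ===== SOURCE B (Python) =====
-- def solution(n):
--     # closed form: sum 1 + sum_{i=2}^n (4i-4) = 2n^2 - 2n + 1 for n >= 1, else 0
--     if n < 1:
--         return 0
--     return 2 * n * n - 2 * n + 1
-- ===== Notes on version B (the rewrite author's own statement) =====
-- stated objective: faster
-- what changed: replaced the O(n) accumulation loop over range(1,n+1) by the closed-form formula 2n^2-2n+1 (0 for n<1)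
import Mathlib
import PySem

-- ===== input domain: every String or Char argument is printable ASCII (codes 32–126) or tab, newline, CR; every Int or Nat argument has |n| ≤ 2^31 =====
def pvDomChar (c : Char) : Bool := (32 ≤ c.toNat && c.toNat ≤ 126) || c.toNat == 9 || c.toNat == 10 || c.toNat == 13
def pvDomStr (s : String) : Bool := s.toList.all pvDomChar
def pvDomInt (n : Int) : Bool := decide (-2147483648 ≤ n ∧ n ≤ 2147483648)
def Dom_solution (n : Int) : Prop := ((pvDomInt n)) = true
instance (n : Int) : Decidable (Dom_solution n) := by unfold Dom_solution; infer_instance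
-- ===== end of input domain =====

-- B replaces A's O(n) accumulation loop by the closed-form formula 2n^2-2n+1 (0 for n<1); asymptotic speed-up.


-- ===== PORT A =====
def solution (n : Int) : Int :=
  (PySem.List.pyRange 1 (n + 1) 1).foldl
    (fun sol i => if i == 1 then 1 else sol + (i * 4 - 4)) 0

-- ===== PORT B =====
def solution_alt (n : Int) : Int :=
  if n < 1 then 0 else 2 * n * n - 2 * n + 1

-- ===== PRECONDITION & SPEC =====
def Spec_solution (n : Int) (out : Int) : Prop := out = solution_alt n
instance (n : Int) (out : Int) : Decidable (Spec_solution n out) := by unfold Spec_solution; infer_instance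

-- ===== CLAIM (what is proved, stated in full; the proofs are below) =====
def Claim_equal_solution : Prop := ∀ (n : Int), Dom_solution n → Spec_solution n (solution n)

-- ===== LEMMAS AND PROOFS =====

-- loop characterisation: for n = k+1 ≥ 1 the fold equals 2k^2+2k+1
theorem solution_loop (k : Nat) :
    (PySem.List.pyRange 1 ((k : Int) + 2) 1).foldl
      (fun sol i => if i == 1 then 1 else sol + (i * 4 - 4)) 0
    = 2 * (k : Int) * (k : Int) + 2 * (k : Int) + 1 := by
  induction k with
  | zero =>
      rw [show ((0 : Nat) : Int) + 2 = 1 + 1 by norm_num,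
        PySem.List.pyRange_one_singleton]
      simp
  | succ m ih =>
      rw [show ((m + 1 : Nat) : Int) + 2 = ((m : Int) + 2) + 1 by push_cast; ring,
        PySem.List.pyRange_one_succ_right (by omega),
        List.foldl_append, ih]
      have hne : (((m : Int) + 2 == 1) = false) := by simp; omega
      simp only [List.foldl_cons, List.foldl_nil, hne]
      push_cast; ring

theorem solution_spec' (n : Int) : solution n = solution_alt n := by
  unfold solution solution_alt
  by_cases h : n < 1
  · rw [PySem.List.pyRange_one_eq_nil (by omega)]
    simp [h]
  · obtain ⟨k, hk⟩ : ∃ k : Nat, n = (k : Int) + 1 :=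
      ⟨(n - 1).toNat, by omega⟩
    subst hk
    rw [if_neg h, show (k : Int) + 1 + 1 = (k : Int) + 2 by ring, solution_loop]
    ring

-- ===== VERDICT (by name: the statement is the Claim_ definition above) =====
theorem solution_spec : Claim_equal_solution := by
  intro n _
  exact solution_spec' n
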